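-- pv_equiv track=rewrite | github.com/Zhusir24/ExamPilot | backend/services/knowledge_base.py | _create_overlap
-- ===== SOURCE A (Python) =====
-- from typing import List, Dict, Any, Optional, Tuple
--
-- def _create_overlap(chunks: List[str], overlap: int) -> str:
--     """
--     从chunk列表的尾部创建重叠部分
--
--     Args:
--         chunks: 片段列表
--         overlap: 期望的重叠长度
--
--     Returns:
--         重叠文本
--     """
--     if not chunks or overlap <= 0:
--         return ""
--
--     # 从尾部开始累积，直到达到overlap长度
--     overlap_parts = []
--     total_len = 0
--
--     for chunk in reversed(chunks):
--         overlap_parts.insert(0, chunk)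
--         total_len += len(chunk)
--         if total_len >= overlap:
--             break
--
--     overlap_text = "".join(overlap_parts)
--
--     # 如果重叠文本太长，截取尾部
--     if len(overlap_text) > overlap:
--         overlap_text = overlap_text[-overlap:]
--
--     return overlap_text
-- ===== SOURCE B (Python) =====
-- def _create_overlap(chunks, overlap):
--     if not chunks or overlap <= 0:
--         return ""
--     # The tail-accumulation in A is irrelevant after the final truncation:
--     # the result is exactly the last `overlap` characters of the concatenation.
--     return "".join(chunks)[-overlap:]
-- ===== Notes on version B (the rewrite author's own statement) =====
-- stated objective: simpler
-- what changed: B drops A's reversed accumulation loop (list.insert(0, ...) with early break) and final conditional truncation, returning the last `overlap` characters of the full concatenation as a single join-and-slice.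
import Mathlib
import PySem

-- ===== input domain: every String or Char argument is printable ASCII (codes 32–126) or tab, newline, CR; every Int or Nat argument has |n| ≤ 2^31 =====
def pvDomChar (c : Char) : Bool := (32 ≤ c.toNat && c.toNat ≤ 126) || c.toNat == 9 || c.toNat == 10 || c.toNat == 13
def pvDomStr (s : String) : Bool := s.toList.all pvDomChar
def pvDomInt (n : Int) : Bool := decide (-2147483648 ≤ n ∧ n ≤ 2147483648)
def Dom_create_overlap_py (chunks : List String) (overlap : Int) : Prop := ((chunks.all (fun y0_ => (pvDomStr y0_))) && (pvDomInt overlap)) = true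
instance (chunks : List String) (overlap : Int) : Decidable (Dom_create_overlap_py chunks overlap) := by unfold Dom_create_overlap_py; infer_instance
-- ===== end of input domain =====

-- B replaces A's reversed tail-accumulation loop (with early break and conditional
-- truncation) by a single closed-form slice of the full concatenation; equal output, simpler code.

-- ===== PORT A =====
-- the 'for chunk in reversed(chunks): overlap_parts.insert(0, chunk); total_len += len(chunk); if total_len >= overlap: break' loop
def pvALoop (overlap : Int) : List String → List String → Int → List String
  | [], parts, _ => parts
  | c :: rest, parts, total =>
    let parts' := c :: parts
    let total' := total + PySem.Str.len c
    if overlap ≤ total' then parts' else pvALoop overlap rest parts' total'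

def create_overlap_py (chunks : List String) (overlap : Int) : String :=
  if chunks = [] ∨ overlap ≤ 0 then "" else
    let overlap_parts := pvALoop overlap chunks.reverse [] 0
    let overlap_text := PySem.Str.join "" overlap_parts
    if overlap < PySem.Str.len overlap_text then
      PySem.Str.slice overlap_text (some (-overlap)) none
    else overlap_text

-- ===== PORT B =====
def create_overlap_py_alt (chunks : List String) (overlap : Int) : String :=
  if chunks = [] ∨ overlap ≤ 0 then "" else
    PySem.Str.slice (PySem.Str.join "" chunks) (some (-overlap)) none

-- ===== PRECONDITION & SPEC =====
def Spec_create_overlap_py (chunks : List String) (overlap : Int) (out : String) : Prop := out = create_overlap_py_alt chunks overlap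
instance (chunks : List String) (overlap : Int) (out : String) : Decidable (Spec_create_overlap_py chunks overlap out) := by unfold Spec_create_overlap_py; infer_instance

-- ===== CLAIM (what is proved, stated in full; the proofs are below) =====
def Claim_equal_create_overlap_py : Prop := ∀ (chunks : List String) (overlap : Int), Dom_create_overlap_py chunks overlap → Spec_create_overlap_py chunks overlap (create_overlap_py chunks overlap)

-- ===== LEMMAS AND PROOFS =====

-- ''.join as character-list flatten
lemma pvJoin_toList (parts : List String) :
    (PySem.Str.join "" parts).toList = (parts.map String.toList).flatten := by
  have h : ∀ ls : List (List Char), List.intercalate [] ls = ls.flatten := by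
    intro ls
    induction ls with
    | nil => simp [List.intercalate]
    | cons a t ih =>
      cases t with
      | nil => simp [List.intercalate]
      | cons b u =>
        simp only [List.intercalate, List.intersperse] at *
        simp_all
  simp [pysem, PySem.Chars.join, h]

-- a string's PySem length is its character count
lemma pvLen_toList (s : String) : PySem.Str.len s = (s.toList.length : Int) := by
  simp [pysem]

-- total character count of a list of strings
def pvS (xs : List String) : Nat := ((xs.map String.toList).flatten).length

-- the loop returns a suffix of (rs.reverse ++ parts); either it consumed everything
-- or the kept suffix already has at least `overlap` characters
lemma pvALoop_spec (overlap : Int) :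
    ∀ (rs parts : List String) (total : Int), total = (pvS parts : Int) →
    ∃ pre, rs.reverse ++ parts = pre ++ pvALoop overlap rs parts total ∧
      (pre = [] ∨ overlap ≤ (pvS (pvALoop overlap rs parts total) : Int)) := by
  intro rs
  induction rs with
  | nil =>
    intro parts total htot
    exact ⟨[], by simp [pvALoop], Or.inl rfl⟩
  | cons c rest ih =>
    intro parts total htot
    have hS : pvS (c :: parts) = c.toList.length + pvS parts := by simp [pvS]
    by_cases hb : overlap ≤ total + PySem.Str.len c
    · refine ⟨rest.reverse, ?_, Or.inr ?_⟩
      · simp only [pvALoop]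
        rw [if_pos hb]
        simp [List.reverse_cons]
      · simp only [pvALoop]
        rw [if_pos hb]
        rw [pvLen_toList] at hb
        omega
    · have htot' : total + PySem.Str.len c = (pvS (c :: parts) : Int) := by
        rw [pvLen_toList]; omega
      obtain ⟨pre, heq, hor⟩ := ih (c :: parts) (total + PySem.Str.len c) htot'
      refine ⟨pre, ?_, ?_⟩
      · simp only [pvALoop]
        rw [if_neg hb]
        calc (c :: rest).reverse ++ parts = rest.reverse ++ (c :: parts) := by simp
          _ = pre ++ pvALoop overlap rest (c :: parts) (total + PySem.Str.len c) := heq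
      · simp only [pvALoop]
        rw [if_neg hb]
        exact hor

-- the common closed form: dropping all but the last `k` characters
lemma pvSlice_toList (s : String) (k : Nat) (hk : 0 < k) :
    (PySem.Str.slice s (some (-(k : Int))) none).toList
      = s.toList.drop (s.toList.length - k) := by
  simp [pysem, PySem.List.slice_from_neg_natCast _ _ hk]

-- ===== VERDICT (by name: the statement is the Claim_ definition above) =====
theorem create_overlap_py_spec : Claim_equal_create_overlap_py := by
  intro chunks overlap _
  unfold Spec_create_overlap_py create_overlap_py create_overlap_py_alt
  by_cases hg : chunks = [] ∨ overlap ≤ 0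
  · simp [hg]
  · rw [if_neg hg, if_neg hg]
    rw [not_or] at hg
    obtain ⟨hne, hpos⟩ := hg
    rw [not_le] at hpos
    have hk : 0 < overlap.toNat := by omega
    have hneg : -overlap = -((overlap.toNat : Nat) : Int) := by omega
    obtain ⟨pre, heq, hor⟩ := pvALoop_spec overlap chunks.reverse [] 0 (by simp [pvS])
    simp only [List.reverse_reverse, List.append_nil] at heq
    set kept := pvALoop overlap chunks.reverse [] 0 with hkept
    apply String.toList_inj.mp
    have hK : (PySem.Str.join "" kept).toList = (kept.map String.toList).flatten :=
      pvJoin_toList kept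
    have hfull : (PySem.Str.join "" chunks).toList
        = (pre.map String.toList).flatten ++ (kept.map String.toList).flatten := by
      rw [pvJoin_toList, heq]; simp
    set P := (pre.map String.toList).flatten
    set K := (kept.map String.toList).flatten
    have hSK : pvS kept = K.length := rfl
    have hrhs : (PySem.Str.slice (PySem.Str.join "" chunks) (some (-overlap)) none).toList
        = (P ++ K).drop ((P ++ K).length - overlap.toNat) := by
      rw [hneg, pvSlice_toList _ _ hk, hfull]
    by_cases hif : overlap < PySem.Str.len (PySem.Str.join "" kept)
    · rw [if_pos hif, hrhs, hneg, pvSlice_toList _ _ hk, hK]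
      have hlen : PySem.Str.len (PySem.Str.join "" kept) = (K.length : Int) := by
        rw [pvLen_toList, hK]
      have hkK : overlap.toNat ≤ K.length := by omega
      have h2 : (P ++ K).length - overlap.toNat = P.length + (K.length - overlap.toNat) := by
        simp only [List.length_append]; omega
      rw [h2, List.drop_length_add_append]
    · rw [if_neg hif, hrhs, hK]
      have hlen : PySem.Str.len (PySem.Str.join "" kept) = (K.length : Int) := by
        rw [pvLen_toList, hK]
      rcases hor with hpre | hov
      · -- loop consumed everything: P = [] and the join is at most overlap long
        have hP : P = [] := by simp [P, hpre]
        rw [hP]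
        simp only [List.nil_append]
        have h0 : K.length - overlap.toNat = 0 := by omega
        rw [h0, List.drop_zero]
      · -- kept suffix has exactly overlap characters here
        have hx : (P ++ K).length - overlap.toNat = P.length + 0 := by
          simp only [List.length_append]; omega
        rw [hx, List.drop_length_add_append, List.drop_zero]
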